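-- pv_equiv track=rewrite | github.com/StudyJudy/Courses_Year3-2 | 大三下/数据安全/资料/差分隐私/源码及工具/演示用完整代码/MWEM_2D.py | maxError
-- ===== SOURCE A (Python) =====
-- def Evaluate(query, data):
--     # 查询集Q本身是一个以dict为项目的list，也就是说，每个查询都是一个dict类型数据
--     # 这里，我们先将dict类型做list化来正确获取dict的左值(即在行上的查询)，绕开dict无序的限制
--     # 然后我们就可以再用获取到的左值来获得dict的右值了，即可将dict还原回两个list的组合
--     q_x = list(query)[0]
--     q_y = query[q_x]
--     counts = 0
--     for i in range(q_x[0],q_x[1]+1):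
--         for j in range(q_y[0],q_y[1]+1):
--             counts += data[i][j]
--     return counts
--
-- def maxError(real, synthetic, Q):
--     maxVal = 0
--     diff = 0
--     for i in range(len(Q)):
--         diff = abs(Evaluate(Q[i], real) - Evaluate(Q[i], synthetic))
--         if diff > maxVal:
--             maxVal = diff
--     return maxVal
-- ===== SOURCE B (Python) =====
-- def _prefix(data):
--     # 2D prefix-sum table over rows padded (conceptually) to the widest row:
--     # P[i][j] = sum of data[a][b] for a < i, b < min(j, len(data[a]))
--     w = 0
--     for r in data:
--         if len(r) > w:
--             w = len(r)
--     P = [[0] * (w + 1)]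
--     for r in data:
--         last = P[-1]
--         new = [0] * (w + 1)
--         s = 0
--         for j in range(w):
--             if j < len(r):
--                 s += r[j]
--             new[j + 1] = last[j + 1] + s
--         P.append(new)
--     return P
--
--
-- def _rect(P, x0, x1, y0, y1):
--     if x0 > x1 or y0 > y1:
--         return 0
--     return P[x1 + 1][y1 + 1] - P[x0][y1 + 1] - P[x1 + 1][y0] + P[x0][y0]
--
--
-- def maxError(real, synthetic, Q):
--     PR = _prefix(real)
--     PS = _prefix(synthetic)
--     best = 0
--     for q in Q:
--         (x0, x1), (y0, y1) = next(iter(q.items()))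
--         d = abs(_rect(PR, x0, x1, y0, y1) - _rect(PS, x0, x1, y0, y1))
--         if d > best:
--             best = d
--     return best
-- ===== Notes on version B (the rewrite author's own statement) =====
-- stated objective: alternative
-- what changed: A re-scans the whole query rectangle of both matrices for every query (nested range loops); B builds one 2D prefix-sum table per matrix once and answers each rectangle query with four table lookups (O(N*W) preprocessing + O(1) per query; cost shifts from query area to matrix size, not measured faster on the probe's inputs).
-- outside the precondition, e.g. on maxError([[1, 2], [3, 4]], [[0, 0], [0, 0]], [{(-2, -1): (0, 1)}]): A returns 10, B returns 3
import Mathlib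
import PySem

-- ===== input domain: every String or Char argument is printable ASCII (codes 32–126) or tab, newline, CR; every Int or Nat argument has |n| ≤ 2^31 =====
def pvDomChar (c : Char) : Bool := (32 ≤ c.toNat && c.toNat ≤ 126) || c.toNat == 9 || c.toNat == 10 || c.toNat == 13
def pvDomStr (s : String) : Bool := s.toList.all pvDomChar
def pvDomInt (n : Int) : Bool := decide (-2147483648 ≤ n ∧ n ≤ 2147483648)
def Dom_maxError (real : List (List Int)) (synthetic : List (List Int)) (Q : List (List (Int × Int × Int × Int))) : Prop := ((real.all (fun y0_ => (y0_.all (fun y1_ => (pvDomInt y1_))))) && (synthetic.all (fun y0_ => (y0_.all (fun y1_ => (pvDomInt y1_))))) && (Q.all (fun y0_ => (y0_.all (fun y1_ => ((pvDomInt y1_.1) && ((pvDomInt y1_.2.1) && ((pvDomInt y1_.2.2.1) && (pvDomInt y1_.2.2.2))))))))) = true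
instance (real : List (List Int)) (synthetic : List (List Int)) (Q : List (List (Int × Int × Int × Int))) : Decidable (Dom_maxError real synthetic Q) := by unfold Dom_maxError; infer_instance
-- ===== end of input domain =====

-- B replaces A's per-query rectangle re-scan by 2D prefix-sum tables built once per matrix,
-- answering each rectangle query with four table lookups (objective: alternative algorithm).


-- ===== PORT A =====
-- Evaluate(query, data): q_x = list(query)[0]; q_y = query[q_x] (dict lookup = first key match);
-- then the nested range loop summing data[i][j].  A query dict {(x0,x1):(y0,y1)} is the assoc list
-- entry (x0,x1,y0,y1).  On an empty dict Python raises IndexError (excluded by Pre_): we return 0.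
def pyEvaluate (query : List (Int × Int × Int × Int)) (data : List (List Int)) : Int :=
  match PySem.List.pyGet? query 0 with
  | none => 0
  | some t =>
    let qx : Int × Int := (t.1, t.2.1)
    let qy : Int × Int :=
      match query.find? (fun u => (u.1, u.2.1) == qx) with
      | some u => (u.2.2.1, u.2.2.2)
      | none => (0, 0)      -- unreachable: the first entry's key always matches itself
    (PySem.List.pyRange qx.1 (qx.2 + 1) 1).foldl (fun counts i =>
      (PySem.List.pyRange qy.1 (qy.2 + 1) 1).foldl (fun c j =>
        c + PySem.List.pyGetD (PySem.List.pyGetD data i []) j 0) counts) 0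

def maxError (real : List (List Int)) (synthetic : List (List Int)) (Q : List (List (Int × Int × Int × Int))) : Int :=
  (PySem.List.pyRange 0 Q.length 1).foldl (fun maxVal i =>
    let q := PySem.List.pyGetD Q i []
    let diff := |pyEvaluate q real - pyEvaluate q synthetic|
    if diff > maxVal then diff else maxVal) 0

-- ===== PORT B =====
-- Source B _prefix: widest row w, then P[i][j] = sum of data[a][b] for a < i, b < min(j, len row a).
def pvWidth (data : List (List Int)) : Nat :=
  data.foldl (fun m r => max m r.length) 0

-- one row of the table: new[0] = 0, new[j+1] = last[j+1] + running sum of r (clamped to len r)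
def pvPrefRow (last : List Int) (r : List Int) (w : Nat) : List Int :=
  ((List.range w).foldl (fun (acc : List Int × Int) j =>
    let s := if j < r.length then acc.2 + r.getD j 0 else acc.2
    (acc.1 ++ [last.getD (j + 1) 0 + s], s)) ([0], 0)).1

def pvPrefix (data : List (List Int)) : List (List Int) :=
  let w := pvWidth data
  data.foldl (fun P r => P ++ [pvPrefRow (P.getLastD []) r w]) [List.replicate (w + 1) 0]

def pvRect (P : List (List Int)) (x0 x1 y0 y1 : Int) : Int :=
  if x0 > x1 ∨ y0 > y1 then 0
  else
    PySem.List.pyGetD (PySem.List.pyGetD P (x1 + 1) []) (y1 + 1) 0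
      - PySem.List.pyGetD (PySem.List.pyGetD P x0 []) (y1 + 1) 0
      - PySem.List.pyGetD (PySem.List.pyGetD P (x1 + 1) []) y0 0
      + PySem.List.pyGetD (PySem.List.pyGetD P x0 []) y0 0

def maxError_alt (real : List (List Int)) (synthetic : List (List Int)) (Q : List (List (Int × Int × Int × Int))) : Int :=
  let PR := pvPrefix real
  let PS := pvPrefix synthetic
  Q.foldl (fun best q =>
    match q with
    | [] => best        -- Python B raises StopIteration on an empty dict (excluded by Pre_)
    | t :: _ =>
      let d := |pvRect PR t.1 t.2.1 t.2.2.1 t.2.2.2 - pvRect PS t.1 t.2.1 t.2.2.1 t.2.2.2|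
      if d > best then d else best) 0

-- ===== PRECONDITION & SPEC =====
-- Pre_ restricts each query to a nonempty dict whose (nonempty) rectangle has nonnegative in-bounds
-- coordinates in both matrices — the natural domain of a rectangle range query.  A raises IndexError
-- on empty dicts and out-of-range coordinates; on NEGATIVE in-range coordinates A still returns a
-- value via Python's negative-index wraparound, which B's prefix-sum tables do not reproduce — those
-- inputs are excluded here (see cites).
def Pre_maxError (real : List (List Int)) (synthetic : List (List Int)) (Q : List (List (Int × Int × Int × Int))) : Prop :=
  ∀ q ∈ Q, q ≠ [] ∧ ∀ t ∈ q.take 1,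
    t.1 ≤ t.2.1 → t.2.2.1 ≤ t.2.2.2 →
      0 ≤ t.1 ∧ t.2.1 < (real.length : Int) ∧ t.2.1 < (synthetic.length : Int) ∧ 0 ≤ t.2.2.1 ∧
      (∀ r ∈ (real.drop t.1.toNat).take (t.2.1 - t.1 + 1).toNat, t.2.2.2 < (r.length : Int)) ∧
      (∀ r ∈ (synthetic.drop t.1.toNat).take (t.2.1 - t.1 + 1).toNat, t.2.2.2 < (r.length : Int))
instance (real : List (List Int)) (synthetic : List (List Int)) (Q : List (List (Int × Int × Int × Int))) : Decidable (Pre_maxError real synthetic Q) := by unfold Pre_maxError; infer_instance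

def pvWitness_maxError : List (List Int) × List (List Int) × (List (List (Int × Int × Int × Int))) :=
  ([[1, 2], [3, 4]], [[0, 1], [0, 0]], [[(0, 1, 0, 1)], [(1, 1, 0, 0)]])

def Spec_maxError (real : List (List Int)) (synthetic : List (List Int)) (Q : List (List (Int × Int × Int × Int))) (out : Int) : Prop := out = maxError_alt real synthetic Q
instance (real : List (List Int)) (synthetic : List (List Int)) (Q : List (List (Int × Int × Int × Int))) (out : Int) : Decidable (Spec_maxError real synthetic Q out) := by unfold Spec_maxError; infer_instance

-- ===== CLAIM (what is proved, stated in full; the proofs are below) =====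
def Claim_equal_maxError : Prop := ∀ (real : List (List Int)) (synthetic : List (List Int)) (Q : List (List (Int × Int × Int × Int))), Dom_maxError real synthetic Q → Pre_maxError real synthetic Q → Spec_maxError real synthetic Q (maxError real synthetic Q)

-- ===== LEMMAS AND PROOFS =====

theorem pvWitness_ok : Dom_maxError (pvWitness_maxError.1) (pvWitness_maxError.2.1) (pvWitness_maxError.2.2) ∧ Pre_maxError (pvWitness_maxError.1) (pvWitness_maxError.2.1) (pvWitness_maxError.2.2) := by decide

-- the cumulative table value: sum over the first i rows of (row.take j).sum
def pvPij (data : List (List Int)) (i j : Nat) : Int :=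
  ((data.take i).map (fun r => (r.take j).sum)).sum

theorem pvPrefRow_loop (last r : List Int) (w : Nat) :
    (List.range w).foldl (fun (acc : List Int × Int) j =>
      let s := if j < r.length then acc.2 + r.getD j 0 else acc.2
      (acc.1 ++ [last.getD (j + 1) 0 + s], s)) ([0], 0)
    = (0 :: (List.range w).map (fun j => last.getD (j + 1) 0 + (r.take (j + 1)).sum),
       (r.take w).sum) := by
  induction w with
  | zero => simp
  | succ w ih =>
    rw [List.range_succ, List.foldl_append, ih, List.foldl_cons, List.foldl_nil]
    by_cases h : w < r.length
    · simp only [h, if_true]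
      have hs : (List.take (w + 1) r).sum = (List.take w r).sum + r.getD w 0 := by
        rw [List.take_add_one, List.sum_append, List.getD_eq_getElem?_getD,
          List.getElem?_eq_getElem h]
        simp
      simp only [Prod.mk.injEq]
      constructor
      · simp [hs]
      · rw [hs]
    · have hle : r.length ≤ w := by omega
      simp only [h, if_false]
      simp only [Prod.mk.injEq]
      constructor
      · simp [List.take_of_length_le hle, List.take_of_length_le (by omega : r.length ≤ w + 1)]
      · simp [List.take_of_length_le hle, List.take_of_length_le (by omega : r.length ≤ w + 1)]

theorem pvPrefRow_eq (last r : List Int) (w : Nat) :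
    pvPrefRow last r w =
      0 :: (List.range w).map (fun j => last.getD (j + 1) 0 + (r.take (j + 1)).sum) := by
  unfold pvPrefRow
  rw [pvPrefRow_loop]

def pvRows (w : Nat) (L : List Int) : List (List Int) → List (List Int)
  | [] => []
  | r :: rest => pvPrefRow L r w :: pvRows w (pvPrefRow L r w) rest

theorem pvBuild_eq (w : Nat) (data : List (List Int)) : ∀ (P0 : List (List Int)),
    data.foldl (fun P r => P ++ [pvPrefRow (P.getLastD []) r w]) P0
      = P0 ++ pvRows w (P0.getLastD []) data := by
  induction data with
  | nil => intro P0; simp [pvRows]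
  | cons r rest ih =>
    intro P0
    rw [List.foldl_cons, ih, pvRows]
    simp

theorem pvPrefRow_getD (L r : List Int) (w : Nat) (base : Nat → Int)
    (hL : ∀ j ≤ w, L.getD j 0 = base j) (h0 : base 0 = 0) :
    ∀ j ≤ w, (pvPrefRow L r w).getD j 0 = base j + (r.take j).sum := by
  intro j hj
  rw [pvPrefRow_eq]
  cases j with
  | zero => simp [h0]
  | succ j' =>
    have hj' : j' < w := by omega
    rw [List.getD_cons_succ]
    rw [List.getD_eq_getElem?_getD, List.getElem?_map, List.getElem?_range hj']
    simp only [Option.getD_some, Option.map_some]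
    rw [hL (j' + 1) hj]



theorem pvRows_getD (w : Nat) (data : List (List Int)) : ∀ (L : List Int) (base : Nat → Int),
    (∀ j ≤ w, L.getD j 0 = base j) → base 0 = 0 →
    ∀ i < data.length, ∀ j ≤ w,
      ((pvRows w L data).getD i []).getD j 0
        = base j + ((data.take (i + 1)).map (fun r => (r.take j).sum)).sum := by
  induction data with
  | nil => intro L base hL h0 i hi; simp at hi
  | cons r rest ih =>
    intro L base hL h0 i hi j hj
    cases i with
    | zero =>
      rw [pvRows]
      simp only [List.getD_cons_zero, List.take_succ_cons, List.take_zero, List.map_cons,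
        List.map_nil, List.sum_cons, List.sum_nil]
      rw [pvPrefRow_getD L r w base hL h0 j hj]
      ring
    | succ i' =>
      rw [pvRows, List.getD_cons_succ]
      have hbase' : ∀ j ≤ w, (pvPrefRow L r w).getD j 0 = base j + (r.take j).sum :=
        pvPrefRow_getD L r w base hL h0
      have h0' : base 0 + (r.take 0).sum = 0 := by simp [h0]
      have := ih (pvPrefRow L r w) (fun j => base j + (r.take j).sum) hbase' h0' i'
        (by simp at hi; omega) j hj
      rw [this]
      simp only [List.take_succ_cons, List.map_cons, List.sum_cons]
      ring

theorem pvPrefix_getD (data : List (List Int)) (i j : Nat)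
    (hi : i ≤ data.length) (hj : j ≤ pvWidth data) :
    ((pvPrefix data).getD i []).getD j 0 = pvPij data i j := by
  unfold pvPrefix
  rw [pvBuild_eq]
  cases i with
  | zero => simp [pvPij]
  | succ i' =>
    have hlast : (([List.replicate (pvWidth data + 1) (0:Int)]).getLastD []) = List.replicate (pvWidth data + 1) 0 := by simp
    rw [hlast]
    have : (List.replicate (pvWidth data + 1) (0:Int) :: pvRows (pvWidth data) (List.replicate (pvWidth data + 1) 0) data).getD (i' + 1) [] = (pvRows (pvWidth data) (List.replicate (pvWidth data + 1) 0) data).getD i' [] := by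
      simp
    simp only [List.singleton_append, this]
    rw [pvRows_getD (pvWidth data) data _ (fun _ => 0)
      (by intro j hj; simp) rfl i' (by omega) j hj]
    simp [pvPij]


theorem pvWidth_ge (data : List (List Int)) (r : List Int) (hr : r ∈ data) :
    r.length ≤ pvWidth data :=
  (PySem.List.le_foldl_max_nat data List.length 0).2 r hr

theorem pvInner (row : List Int) (y0 y1 : Int) (hy0 : 0 ≤ y0) (hy01 : y0 ≤ y1)
    (hrow : y1 < (row.length : Int)) (c0 : Int) :
    (PySem.List.pyRange y0 (y1 + 1) 1).foldl (fun c j => c + PySem.List.pyGetD row j 0) c0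
      = c0 + ((row.take (y1 + 1).toNat).drop y0.toNat).sum := by
  set u := row.take (y1 + 1).toNat with hu
  have hlenu : u.length = (y1 + 1).toNat := by
    rw [hu, List.length_take]; omega
  have hcast : (y1 + 1) = PySem.List.len u := by rw [PySem.List.len_eq, hlenu]; omega
  have hcong : ∀ (c : Int), ∀ j ∈ PySem.List.pyRange y0 (y1 + 1) 1,
      c + PySem.List.pyGetD row j 0 = c + PySem.List.pyGetD u j 0 := by
    intro c j hj
    rw [PySem.List.mem_pyRange_one] at hj
    rw [PySem.List.pyGetD_eq_getElem row 0 (by omega) (by omega),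
      PySem.List.pyGetD_eq_getElem u 0 (by omega) (by rw [hlenu]; omega)]
    simp [hu, List.getElem_take]
  rw [PySem.List.foldl_congr_mem _ _ _ _ hcong, hcast,
    PySem.List.foldl_pyRange_pyGetD u 0 (fun c x => c + x) c0 hy0,
    PySem.List.foldl_add]
  simp

theorem pvASum (data : List (List Int)) (x0 x1 y0 y1 : Int)
    (hx0 : 0 ≤ x0) (hx01 : x0 ≤ x1) (hx1 : x1 < (data.length : Int))
    (hy0 : 0 ≤ y0) (hy01 : y0 ≤ y1)
    (hy1 : ∀ r ∈ (data.drop x0.toNat).take (x1 - x0 + 1).toNat, y1 < (r.length : Int)) :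
    (PySem.List.pyRange x0 (x1 + 1) 1).foldl (fun counts i =>
      (PySem.List.pyRange y0 (y1 + 1) 1).foldl (fun c j =>
        c + PySem.List.pyGetD (PySem.List.pyGetD data i []) j 0) counts) 0
    = (((data.take (x1 + 1).toNat).drop x0.toNat).map
        (fun r => ((r.take (y1 + 1).toNat).drop y0.toNat).sum)).sum := by
  set v := data.take (x1 + 1).toNat with hv
  have hlenv : v.length = (x1 + 1).toNat := by rw [hv, List.length_take]; omega
  have hcastv : (x1 + 1) = PySem.List.len v := by rw [PySem.List.len_eq, hlenv]; omega
  have hsl : ∀ (i : Int), x0 ≤ i → i ≤ x1 → data[i.toNat]! ∈ (data.drop x0.toNat).take (x1 - x0 + 1).toNat := by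
    intro i h1 h2
    have hi : i.toNat < data.length := by omega
    have hidx : i.toNat - x0.toNat < ((data.drop x0.toNat).take (x1 - x0 + 1).toNat).length := by
      rw [List.length_take, List.length_drop]; omega
    have : ((data.drop x0.toNat).take (x1 - x0 + 1).toNat)[i.toNat - x0.toNat] = data[i.toNat] := by
      rw [List.getElem_take, List.getElem_drop]
      congr 1; omega
    rw [getElem!_pos data i.toNat hi, ← this]
    exact List.getElem_mem _
  have hcong : ∀ (counts : Int), ∀ i ∈ PySem.List.pyRange x0 (x1 + 1) 1,
      (PySem.List.pyRange y0 (y1 + 1) 1).foldl (fun c j =>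
        c + PySem.List.pyGetD (PySem.List.pyGetD data i []) j 0) counts
      = counts + ((((PySem.List.pyGetD v i []).take (y1 + 1).toNat).drop y0.toNat).sum) := by
    intro counts i hi
    rw [PySem.List.mem_pyRange_one] at hi
    have hiN : i.toNat < data.length := by omega
    have hrowlen : y1 < (((PySem.List.pyGetD data i ([] : List Int)).length : Int)) := by
      rw [PySem.List.pyGetD_eq_getElem data [] (by omega) (by omega)]
      have := hy1 _ (hsl i hi.1 (by omega))
      rwa [getElem!_pos data i.toNat hiN] at this
    rw [pvInner _ y0 y1 hy0 hy01 hrowlen counts]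
    have : PySem.List.pyGetD data i ([] : List Int) = PySem.List.pyGetD v i [] := by
      rw [PySem.List.pyGetD_eq_getElem data [] (by omega) (by omega),
        PySem.List.pyGetD_eq_getElem v [] (by omega) (by rw [hlenv]; omega)]
      simp [hv, List.getElem_take]
    rw [this]
  rw [PySem.List.foldl_congr_mem _ _ _ _ hcong, hcastv,
    PySem.List.foldl_pyRange_pyGetD v []
      (fun counts r => counts + ((r.take (y1 + 1).toNat).drop y0.toNat).sum) 0 hx0,
    PySem.List.foldl_add]
  simp

theorem pvPij_sub (data : List (List Int)) (A B j : Nat) (hAB : A ≤ B) :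
    pvPij data B j - pvPij data A j
      = (((data.take B).drop A).map (fun r => (r.take j).sum)).sum := by
  have hsplit : data.take B = data.take A ++ (data.take B).drop A := by
    conv_lhs => rw [← List.take_append_drop A (data.take B)]
    rw [List.take_take, Nat.min_eq_left hAB]
  unfold pvPij
  conv_lhs => rw [hsplit]
  rw [List.map_append, List.sum_append]
  ring

theorem pvRowSub (r : List Int) (j0 J : Nat) (h : j0 ≤ J) :
    ((r.take J).drop j0).sum = (r.take J).sum - (r.take j0).sum := by
  have hsplit : r.take J = r.take j0 ++ (r.take J).drop j0 := by
    conv_lhs => rw [← List.take_append_drop j0 (r.take J)]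
    rw [List.take_take, Nat.min_eq_left h]
  conv_rhs => rw [hsplit]
  rw [List.sum_append]
  ring

theorem pvSumSub (l : List (List Int)) (f g : List Int → Int) :
    (l.map (fun r => f r - g r)).sum = (l.map f).sum - (l.map g).sum := by
  induction l with
  | nil => simp
  | cons x t ih => simp [ih]; ring

theorem pvRect_eq (data : List (List Int)) (x0 x1 y0 y1 : Int)
    (hx0 : 0 ≤ x0) (hx01 : x0 ≤ x1) (hx1 : x1 < (data.length : Int))
    (hy0 : 0 ≤ y0) (hy01 : y0 ≤ y1)
    (hy1 : ∀ r ∈ (data.drop x0.toNat).take (x1 - x0 + 1).toNat, y1 < (r.length : Int)) :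
    (PySem.List.pyRange x0 (x1 + 1) 1).foldl (fun counts i =>
      (PySem.List.pyRange y0 (y1 + 1) 1).foldl (fun c j =>
        c + PySem.List.pyGetD (PySem.List.pyGetD data i []) j 0) counts) 0
    = pvRect (pvPrefix data) x0 x1 y0 y1 := by
  have hslice : (data.take (x1 + 1).toNat).drop x0.toNat
      = (data.drop x0.toNat).take (x1 - x0 + 1).toNat := by
    rw [List.drop_take]
    congr 1; omega
  -- bound on the width
  have hr0 : data[x0.toNat]! ∈ (data.drop x0.toNat).take (x1 - x0 + 1).toNat := by
    have hidx : (0 : Nat) < ((data.drop x0.toNat).take (x1 - x0 + 1).toNat).length := by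
      rw [List.length_take, List.length_drop]; omega
    have : ((data.drop x0.toNat).take (x1 - x0 + 1).toNat)[0] = data[x0.toNat] := by
      simp [List.getElem_take, List.getElem_drop]
    rw [getElem!_pos data x0.toNat (by omega), ← this]
    exact List.getElem_mem _
  have hmemd : data[x0.toNat]! ∈ data := by
    rw [getElem!_pos data x0.toNat (by omega)]; exact List.getElem_mem _
  have hw : y1 + 1 ≤ (pvWidth data : Int) := by
    have h1 := hy1 _ hr0
    have h2 := pvWidth_ge data _ hmemd
    omega
  have hrect : pvRect (pvPrefix data) x0 x1 y0 y1
      = pvPij data (x1 + 1).toNat (y1 + 1).toNat - pvPij data x0.toNat (y1 + 1).toNat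
        - pvPij data (x1 + 1).toNat y0.toNat + pvPij data x0.toNat y0.toNat := by
    unfold pvRect
    rw [if_neg (by omega)]
    have e1 : x1 + 1 = (((x1 + 1).toNat : Int)) := by omega
    have e2 : y1 + 1 = (((y1 + 1).toNat : Int)) := by omega
    have e3 : x0 = ((x0.toNat : Int)) := by omega
    have e4 : y0 = ((y0.toNat : Int)) := by omega
    rw [e1, e2, e3, e4]
    simp only [PySem.List.pyGetD_natCast]
    rw [pvPrefix_getD data _ _ (by omega) (by omega),
      pvPrefix_getD data _ _ (by omega) (by omega),
      pvPrefix_getD data _ _ (by omega) (by omega),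
      pvPrefix_getD data _ _ (by omega) (by omega)]
    simp only [Int.toNat_natCast]
  rw [pvASum data x0 x1 y0 y1 hx0 hx01 hx1 hy0 hy01 hy1, hrect]
  have hAB : x0.toNat ≤ (x1 + 1).toNat := by omega
  have hJ : y0.toNat ≤ (y1 + 1).toNat := by omega
  have hre : pvPij data (x1 + 1).toNat (y1 + 1).toNat - pvPij data x0.toNat (y1 + 1).toNat
        - pvPij data (x1 + 1).toNat y0.toNat + pvPij data x0.toNat y0.toNat
      = (pvPij data (x1 + 1).toNat (y1 + 1).toNat - pvPij data x0.toNat (y1 + 1).toNat)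
        - (pvPij data (x1 + 1).toNat y0.toNat - pvPij data x0.toNat y0.toNat) := by ring
  rw [hre, pvPij_sub data _ _ _ hAB, pvPij_sub data _ _ _ hAB, ← pvSumSub]
  congr 1
  apply List.map_congr_left
  intro r hr
  rw [hslice] at hr
  exact pvRowSub r y0.toNat (y1 + 1).toNat hJ

theorem pyEvaluate_eq (data : List (List Int)) (t : Int × Int × Int × Int)
    (rest : List (Int × Int × Int × Int))
    (h : t.1 ≤ t.2.1 → t.2.2.1 ≤ t.2.2.2 →
      0 ≤ t.1 ∧ t.2.1 < (data.length : Int) ∧ 0 ≤ t.2.2.1 ∧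
      ∀ r ∈ (data.drop t.1.toNat).take (t.2.1 - t.1 + 1).toNat, t.2.2.2 < (r.length : Int)) :
    pyEvaluate (t :: rest) data = pvRect (pvPrefix data) t.1 t.2.1 t.2.2.1 t.2.2.2 := by
  obtain ⟨x0, x1, y0, y1⟩ := t
  simp only at h ⊢
  have hfind : ((x0, x1, y0, y1) :: rest).find?
      (fun u => (u.1, u.2.1) == ((x0, x1, y0, y1).1, (x0, x1, y0, y1).2.1)) = some (x0, x1, y0, y1) := by
    rw [List.find?_cons_of_pos]
    simp
  unfold pyEvaluate
  rw [PySem.List.pyGet?_zero_cons]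
  simp only [hfind]
  by_cases hx : x0 ≤ x1
  · by_cases hy : y0 ≤ y1
    · obtain ⟨h1, h2, h3, h4⟩ := h hx hy
      exact pvRect_eq data x0 x1 y0 y1 h1 hx h2 h3 hy h4
    · have hinner : ∀ (counts : Int), ∀ i ∈ PySem.List.pyRange x0 (x1 + 1) 1,
          (PySem.List.pyRange y0 (y1 + 1) 1).foldl (fun c j =>
            c + PySem.List.pyGetD (PySem.List.pyGetD data i []) j 0) counts = counts := by
        intro counts i hi
        rw [PySem.List.pyRange_one_eq_nil (by omega), List.foldl_nil]
      rw [PySem.List.foldl_congr_mem _ _ (fun counts _ => counts) _ hinner,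
        PySem.List.foldl_ignore]
      unfold pvRect
      rw [if_pos (by omega)]
  · rw [PySem.List.pyRange_one_eq_nil (by omega : x1 + 1 ≤ x0), List.foldl_nil]
    unfold pvRect
    rw [if_pos (by omega)]

-- ===== VERDICT (by name: the statement is the Claim_ definition above) =====
theorem maxError_spec : Claim_equal_maxError := by
  unfold Claim_equal_maxError
  intro real synthetic Q _ hPre
  unfold Spec_maxError maxError maxError_alt
  rw [PySem.List.foldl_pyRange_zero_pyGetD' Q []
    (fun maxVal q =>
      let diff := |pyEvaluate q real - pyEvaluate q synthetic|
      if diff > maxVal then diff else maxVal) 0]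
  apply PySem.List.foldl_congr_mem
  intro acc q hq
  obtain ⟨hne, hcond⟩ := hPre q hq
  cases q with
  | nil => exact absurd rfl hne
  | cons t rest =>
    have ht : t ∈ (t :: rest).take 1 := by simp
    have hc := hcond t ht
    have hreal : t.1 ≤ t.2.1 → t.2.2.1 ≤ t.2.2.2 →
        0 ≤ t.1 ∧ t.2.1 < (real.length : Int) ∧ 0 ≤ t.2.2.1 ∧
        ∀ r ∈ (real.drop t.1.toNat).take (t.2.1 - t.1 + 1).toNat, t.2.2.2 < (r.length : Int) := by
      intro h1 h2
      obtain ⟨a, b, _, c, d, _⟩ := hc h1 h2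
      exact ⟨a, b, c, d⟩
    have hsyn : t.1 ≤ t.2.1 → t.2.2.1 ≤ t.2.2.2 →
        0 ≤ t.1 ∧ t.2.1 < (synthetic.length : Int) ∧ 0 ≤ t.2.2.1 ∧
        ∀ r ∈ (synthetic.drop t.1.toNat).take (t.2.1 - t.1 + 1).toNat, t.2.2.2 < (r.length : Int) := by
      intro h1 h2
      obtain ⟨a, _, b, c, _, d⟩ := hc h1 h2
      exact ⟨a, b, c, d⟩
    simp only [pyEvaluate_eq real t rest hreal, pyEvaluate_eq synthetic t rest hsyn]
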